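-- pv_equiv track=rewrite | github.com/tawerrd/JFOAC | main.py | get_display_messages
-- ===== SOURCE A (Python) =====
-- def get_display_messages(messages):
--     display_messages = []
--     for i in range(0, len(messages), 2):
--         if i+1 < len(messages):
--             user_msg = messages[i]['content']
--             ai_msg = messages[i+1]['content']
--             display_messages.append([user_msg, ai_msg])
--     return display_messages
-- ===== SOURCE B (Python) =====
-- def get_display_messages(messages):
--     it = iter(messages)
--     return [[u['content'], a['content']] for u, a in zip(it, it)]
-- ===== Notes on version B (the rewrite author's own statement) =====
-- stated objective: idiomatic
-- what changed: Replaces the index loop over range(0, len, 2) with a bounds check by pairwise consumption of a single iterator zipped with itself (zip(it, it)), whose truncation drops a trailing odd message identically.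
import Mathlib
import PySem

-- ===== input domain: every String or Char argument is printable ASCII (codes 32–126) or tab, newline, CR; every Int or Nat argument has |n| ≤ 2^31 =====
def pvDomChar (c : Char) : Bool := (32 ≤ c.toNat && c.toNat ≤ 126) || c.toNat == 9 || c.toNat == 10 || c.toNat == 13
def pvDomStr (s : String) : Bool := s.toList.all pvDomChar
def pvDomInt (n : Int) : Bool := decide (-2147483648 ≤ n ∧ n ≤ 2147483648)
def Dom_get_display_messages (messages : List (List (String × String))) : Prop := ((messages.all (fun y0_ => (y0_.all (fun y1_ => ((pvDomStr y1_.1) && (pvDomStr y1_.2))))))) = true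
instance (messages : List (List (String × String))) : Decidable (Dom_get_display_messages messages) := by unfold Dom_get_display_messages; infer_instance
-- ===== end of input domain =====

-- B replaces A's index loop over range(0, len, 2) with pairwise recursion (zip of one iterator with itself); idiomatic, same cost.


-- shared helper: m['content'] (total form; Pre_ guarantees the key is present)
def pvContent (m : List (String × String)) : String :=
  (PySem.Dict.mk m).getD "content" ""

-- ===== PORT A =====
def get_display_messages (messages : List (List (String × String))) : List (List String) :=
  (PySem.List.pyRange 0 (PySem.List.len messages) 2).foldl
    (fun display_messages i =>
      if i + 1 < PySem.List.len messages then
        display_messages ++ [[pvContent (PySem.List.pyGetD messages i []),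
                              pvContent (PySem.List.pyGetD messages (i + 1) [])]]
      else display_messages) []

-- ===== PORT B =====
def get_display_messages_alt (messages : List (List (String × String))) : List (List String) :=
  match messages with
  | u :: a :: rest => [pvContent u, pvContent a] :: get_display_messages_alt rest
  | _ => []

-- ===== PRECONDITION & SPEC =====
-- Pre_ excludes exactly the inputs on which the Python A raises KeyError: a paired
-- message (any message except a trailing odd one) lacking the key 'content'.
def Pre_get_display_messages (messages : List (List (String × String))) : Prop :=
  ∀ m ∈ messages.take (2 * (messages.length / 2)), (PySem.Dict.mk m).contains "content" = true
instance (messages : List (List (String × String))) : Decidable (Pre_get_display_messages messages) := by unfold Pre_get_display_messages; infer_instance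
def pvWitness_get_display_messages : (List (List (String × String))) :=
  [[("content", "hi")], [("content", "yo")], [("role", "user")]]

def Spec_get_display_messages (messages : List (List (String × String))) (out : List (List String)) : Prop := out = get_display_messages_alt messages
instance (messages : List (List (String × String))) (out : List (List String)) : Decidable (Spec_get_display_messages messages out) := by unfold Spec_get_display_messages; infer_instance

-- ===== CLAIM (what is proved, stated in full; the proofs are below) =====
def Claim_equal_get_display_messages : Prop := ∀ (messages : List (List (String × String))), Dom_get_display_messages messages → Pre_get_display_messages messages → Spec_get_display_messages messages (get_display_messages messages)

-- ===== LEMMAS AND PROOFS =====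

theorem pyRange_two_nil (a b : Int) (h : b ≤ a) : PySem.List.pyRange a b 2 = [] := by
  rw [PySem.List.pyRange_of_pos a b (by norm_num)]
  simp [if_neg (by omega : ¬ a < b)]

theorem pyRange_two_cons (a b : Int) (h : a < b) :
    PySem.List.pyRange a b 2 = a :: PySem.List.pyRange (a + 2) b 2 := by
  rw [PySem.List.pyRange_of_pos a b (by norm_num),
      PySem.List.pyRange_of_pos (a + 2) b (by norm_num)]
  by_cases h2 : a + 2 < b
  · have hc : ((b - a + 2 - 1) / 2).toNat = ((b - (a + 2) + 2 - 1) / 2).toNat + 1 := by omega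
    rw [if_pos h, if_pos h2, hc, List.range_succ_eq_map]
    simp [List.map_map, Function.comp]
    intro k _
    ring
  · have hc : ((b - a + 2 - 1) / 2).toNat = 1 := by omega
    rw [if_pos h, if_neg h2, hc]
    simp

theorem getD_append_length {α : Type} (pre : List α) (x : α) (rest : List α) (d : α) :
    (pre ++ x :: rest).getD pre.length d = x := by
  simp [List.getD]

-- loop invariant: starting the step-2 range at index pre.length over pre ++ ms
-- appends exactly B's pairing of ms
theorem loopA_aux (ms : List (List (String × String))) :
    ∀ (pre : List (List (String × String))) (acc : List (List String)),
    (PySem.List.pyRange pre.length (PySem.List.len (pre ++ ms)) 2).foldl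
      (fun display_messages i =>
        if i + 1 < PySem.List.len (pre ++ ms) then
          display_messages ++ [[pvContent (PySem.List.pyGetD (pre ++ ms) i []),
                                pvContent (PySem.List.pyGetD (pre ++ ms) (i + 1) [])]]
        else display_messages) acc
    = acc ++ get_display_messages_alt ms := by
  induction ms using get_display_messages_alt.induct with
  | case1 u a rest ih =>
    intro pre acc
    have hlen : PySem.List.len (pre ++ u :: a :: rest) = (pre.length : Int) + 2 + rest.length := by
      simp [PySem.List.len_eq]; omega
    rw [pyRange_two_cons _ _ (by rw [hlen]; omega)]
    simp only [List.foldl_cons]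
    rw [if_pos (by rw [hlen]; omega)]
    have h1 : PySem.List.pyGetD (pre ++ u :: a :: rest) (pre.length : Int) [] = u := by
      rw [PySem.List.pyGetD_natCast, getD_append_length]
    have h2 : PySem.List.pyGetD (pre ++ u :: a :: rest) ((pre.length : Int) + 1) [] = a := by
      have : ((pre.length : Int) + 1) = ((pre ++ [u]).length : Int) := by simp
      rw [this, PySem.List.pyGetD_natCast]
      have : pre ++ u :: a :: rest = (pre ++ [u]) ++ a :: rest := by simp
      rw [this, getD_append_length]
    rw [h1, h2]
    have hsplit : pre ++ u :: a :: rest = (pre ++ [u, a]) ++ rest := by simp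
    have hlen2 : (pre.length : Int) + 2 = ((pre ++ [u, a]).length : Int) := by simp
    calc (PySem.List.pyRange ((pre.length : Int) + 2) (PySem.List.len (pre ++ u :: a :: rest)) 2).foldl
          (fun display_messages i =>
            if i + 1 < PySem.List.len (pre ++ u :: a :: rest) then
              display_messages ++ [[pvContent (PySem.List.pyGetD (pre ++ u :: a :: rest) i []),
                                    pvContent (PySem.List.pyGetD (pre ++ u :: a :: rest) (i + 1) [])]]
            else display_messages)
          (acc ++ [[pvContent u, pvContent a]])
        = (acc ++ [[pvContent u, pvContent a]]) ++ get_display_messages_alt rest := by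
          rw [hlen2, hsplit]; exact ih (pre ++ [u, a]) _
      _ = acc ++ get_display_messages_alt (u :: a :: rest) := by
          rw [get_display_messages_alt]; simp
  | case2 ms hms =>
    intro pre acc
    match ms with
    | [] =>
      rw [pyRange_two_nil _ _ (by simp [PySem.List.len_eq])]
      simp [get_display_messages_alt]
    | [u] =>
      have hlen : PySem.List.len (pre ++ [u]) = (pre.length : Int) + 1 := by
        simp [PySem.List.len_eq]
      rw [hlen, pyRange_two_cons _ _ (by omega), pyRange_two_nil _ _ (by omega)]
      simp only [List.foldl_cons, List.foldl_nil]
      rw [if_neg (by omega)]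
      simp [get_display_messages_alt]
    | u :: a :: rest => exact (hms u a rest rfl).elim

-- ===== VERDICT (by name: the statement is the Claim_ definition above) =====
theorem get_display_messages_spec : Claim_equal_get_display_messages := by
  intro messages _ _
  unfold Spec_get_display_messages get_display_messages
  have := loopA_aux messages [] []
  simpa using this
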